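-- pv_equiv track=rewrite | github.com/spen428/music-collection-checker | test/StringToFilesystem.py | _get_intermediate_dirs
-- ===== SOURCE A (Python) =====
-- from typing import List, Dict, Tuple, Set, Iterable
--
-- def _get_intermediate_dirs(lines: Iterable[str], root_dir: str) -> Set[str]:
--     intermediate_dirs = set()
--     for line in lines:
--         index = 0
--         while True:
--             index = line.find('/', index) + 1
--             if index == 0:
--                 break
--             substr = line[0:index]
--             if substr == root_dir:
--                 continue
--             if substr.startswith(root_dir):
--                 intermediate_dirs.add(substr)
--     return intermediate_dirs
-- ===== SOURCE B (Python) =====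
-- def _get_intermediate_dirs(lines, root_dir):
--     intermediate_dirs = set()
--     for line in lines:
--         if not line.startswith(root_dir):
--             continue
--         acc = root_dir
--         for ch in line[len(root_dir):]:
--             acc += ch
--             if ch == '/':
--                 intermediate_dirs.add(acc)
--     return intermediate_dirs
-- ===== Notes on version B (the rewrite author's own statement) =====
-- stated objective: simpler
-- what changed: Replaces the repeated find('/')+slice loop with per-prefix root_dir tests by one startswith(root_dir) check per line followed by a single character scan over the remainder with a running prefix accumulator.
import Mathlib
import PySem

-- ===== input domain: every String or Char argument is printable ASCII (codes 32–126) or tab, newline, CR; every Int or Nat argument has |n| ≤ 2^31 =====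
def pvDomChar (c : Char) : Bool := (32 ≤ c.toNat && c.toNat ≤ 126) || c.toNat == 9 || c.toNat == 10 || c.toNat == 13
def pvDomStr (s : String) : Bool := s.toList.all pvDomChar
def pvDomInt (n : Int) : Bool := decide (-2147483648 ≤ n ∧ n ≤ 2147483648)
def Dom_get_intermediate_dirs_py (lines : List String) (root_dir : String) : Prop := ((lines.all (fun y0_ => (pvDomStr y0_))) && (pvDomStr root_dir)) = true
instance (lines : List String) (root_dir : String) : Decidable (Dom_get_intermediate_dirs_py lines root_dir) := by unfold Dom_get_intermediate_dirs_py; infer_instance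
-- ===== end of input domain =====

-- B replaces A's find('/')-and-slice scan (with a per-prefix startswith test) by one
-- startswith(root_dir) check per line and a single running-prefix character scan: simpler.
-- Both programs return a set; the ports hold its distinct elements in insertion order.

-- ===== PORT A =====
-- Python's 'while True: index = line.find('/', index) + 1 …' ported with fuel
-- line.length + 1: index strictly increases each pass, so that many passes suffice.
def aInner (line : List Char) (root_dir : List Char) (fuel : Nat) (index : Int)
    (s : PySem.Set (List Char)) : PySem.Set (List Char) :=
  match fuel with
  | 0 => s
  | fuel + 1 =>
    let index' := PySem.Chars.findFrom line ['/'] index + 1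
    if index' = 0 then s
    else
      let substr := PySem.Chars.slice line (some 0) (some index')
      if substr = root_dir then aInner line root_dir fuel index' s
      else if PySem.Chars.startswith substr root_dir then
        aInner line root_dir fuel index' (PySem.Set.add s substr)
      else aInner line root_dir fuel index' s

def get_intermediate_dirs_py (lines : List String) (root_dir : String) : List String :=
  (lines.foldl (fun s line => aInner line.toList root_dir.toList (line.toList.length + 1) 0 s)
    PySem.Set.empty).map (fun cs => String.ofList cs)

-- ===== PORT B =====
-- 'acc += ch; if ch == '/': dirs.add(acc)' over line[len(root_dir):], with acc starting at root_dir.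
def bLine (root_dir : List Char) (s : PySem.Set (List Char)) (line : List Char) :
    PySem.Set (List Char) :=
  if PySem.Chars.startswith line root_dir then
    ((PySem.Chars.slice line (some (root_dir.length : Int)) none).foldl
      (fun (st : List Char × PySem.Set (List Char)) ch =>
        let acc := st.1 ++ [ch]
        if ch = '/' then (acc, PySem.Set.add st.2 acc) else (acc, st.2))
      (root_dir, s)).2
  else s

def get_intermediate_dirs_py_alt (lines : List String) (root_dir : String) : List String :=
  (lines.foldl (fun s line => bLine root_dir.toList s line.toList)
    PySem.Set.empty).map (fun cs => String.ofList cs)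

-- ===== PRECONDITION & SPEC =====
def Spec_get_intermediate_dirs_py (lines : List String) (root_dir : String) (out : List String) : Prop := out = get_intermediate_dirs_py_alt lines root_dir
instance (lines : List String) (root_dir : String) (out : List String) : Decidable (Spec_get_intermediate_dirs_py lines root_dir out) := by unfold Spec_get_intermediate_dirs_py; infer_instance

-- ===== CLAIM (what is proved, stated in full; the proofs are below) =====
def Claim_equal_get_intermediate_dirs_py : Prop := ∀ (lines : List String) (root_dir : String), Dom_get_intermediate_dirs_py lines root_dir → Spec_get_intermediate_dirs_py lines root_dir (get_intermediate_dirs_py lines root_dir)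

-- ===== LEMMAS AND PROOFS =====

-- The common specification both per-line loops are reduced to: walk the line left to
-- right; at each '/' apply A's test/insert step to the prefix built so far.
def canoStep (r : List Char) (s : PySem.Set (List Char)) (p : List Char) :
    PySem.Set (List Char) :=
  if p = r then s else if r.isPrefixOf p then PySem.Set.add s p else s

def cano (t : List Char) (p : List Char) (r : List Char) (s : PySem.Set (List Char)) :
    PySem.Set (List Char) :=
  match t with
  | [] => s
  | c :: t => cano t (p ++ [c]) r (if c = '/' then canoStep r s (p ++ [c]) else s)

-- like cano, but every '/'-prefix is inserted unconditionally (B's inner loop)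
def canoAdd (t : List Char) (p : List Char) (s : PySem.Set (List Char)) :
    PySem.Set (List Char) :=
  match t with
  | [] => s
  | c :: t => canoAdd t (p ++ [c]) (if c = '/' then PySem.Set.add s (p ++ [c]) else s)

theorem singleton_infix_iff {a : Char} {l : List Char} : [a] <:+: l ↔ a ∈ l := by
  constructor
  · rintro ⟨u, v, rfl⟩; simp
  · intro h
    obtain ⟨u, v, rfl⟩ := List.append_of_mem h
    exact ⟨u, v, by simp⟩

theorem singleton_prefix_drop {a : Char} {t : List Char} {i : Nat} (hi : i < t.length)
    (h : t[i] = a) : [a] <+: t.drop i :=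
  ⟨t.drop (i + 1), by rw [List.drop_eq_getElem_cons hi, h]; rfl⟩

theorem cano_no_slash (t p : List Char) (r : List Char) (s : PySem.Set (List Char))
    (h : '/' ∉ t) : cano t p r s = s := by
  induction t generalizing p s with
  | nil => rfl
  | cons c t ih =>
    simp only [List.mem_cons, not_or] at h
    have hc : c ≠ '/' := fun hh => h.1 hh.symm
    simp [cano, hc, ih _ _ h.2]

theorem cano_append (t1 t2 p : List Char) (r : List Char) (s : PySem.Set (List Char)) :
    cano (t1 ++ t2) p r s = cano t2 (p ++ t1) r (cano t1 p r s) := by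
  induction t1 generalizing p s with
  | nil => simp [cano]
  | cons c t ih => simp [cano, ih, List.append_assoc]

theorem cano_seg (t1 t2 p : List Char) (r : List Char) (s : PySem.Set (List Char))
    (h : '/' ∉ t1) :
    cano (t1 ++ '/' :: t2) p r s
      = cano t2 (p ++ t1 ++ ['/']) r (canoStep r s (p ++ t1 ++ ['/'])) := by
  rw [show t1 ++ '/' :: t2 = (t1 ++ ['/']) ++ t2 by simp, cano_append]
  have h1 : cano (t1 ++ ['/']) p r s = canoStep r s (p ++ t1 ++ ['/']) := by
    rw [cano_append, cano_no_slash t1 p r s h]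
    simp [cano, List.append_assoc]
  rw [h1]; simp [List.append_assoc]

-- prefixes strictly inside the root can never be inserted
theorem cano_inside (t p : List Char) (r : List Char) (s : PySem.Set (List Char))
    (h : (p ++ t) <+: r) : cano t p r s = s := by
  induction t generalizing p s with
  | nil => rfl
  | cons c t ih =>
    have hpref : (p ++ [c]) ++ t <+: r := by simpa using h
    have hc : (p ++ [c]) <+: r := (List.prefix_append (p ++ [c]) t).trans hpref
    have hstep : (if c = '/' then canoStep r s (p ++ [c]) else s) = s := by
      split
      · unfold canoStep
        split
        · rfl
        · rename_i hne
          have hnp : ¬ r.isPrefixOf (p ++ [c]) := by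
            intro hrp
            have hrp' : r <+: (p ++ [c]) := (List.isPrefixOf_iff_prefix).1 hrp
            exact hne (List.IsPrefix.eq_of_length hc
              (Nat.le_antisymm hc.length_le hrp'.length_le))
          simp [hnp]
      · rfl
    rw [cano, hstep, ih _ _ hpref]

-- if the root is not a prefix of the whole line, nothing is ever inserted
theorem cano_not_pref (t p : List Char) (r : List Char) (s : PySem.Set (List Char))
    (h : ¬ r <+: (p ++ t)) : cano t p r s = s := by
  induction t generalizing p s with
  | nil => rfl
  | cons c t ih =>
    have hassoc : (p ++ [c]) ++ t = p ++ c :: t := by simp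
    have h' : ¬ r <+: ((p ++ [c]) ++ t) := by rw [hassoc]; exact h
    have hup : (p ++ [c]) <+: p ++ c :: t := by
      rw [← hassoc]; exact List.prefix_append _ _
    have hstep : (if c = '/' then canoStep r s (p ++ [c]) else s) = s := by
      split
      · unfold canoStep
        split
        · rename_i he
          exact absurd (he ▸ hup) h
        · have hnp : ¬ r.isPrefixOf (p ++ [c]) := by
            intro hrp
            exact h (((List.isPrefixOf_iff_prefix).1 hrp).trans hup)
          simp [hnp]
      · rfl
    rw [cano, hstep, ih _ _ h']

-- once the accumulated prefix already extends the root, A's step is an unconditional add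
theorem cano_eq_canoAdd (t p : List Char) (r : List Char) (s : PySem.Set (List Char))
    (h : r <+: p) : cano t p r s = canoAdd t p s := by
  induction t generalizing p s with
  | nil => rfl
  | cons c t ih =>
    have h' : r <+: (p ++ [c]) := h.trans (List.prefix_append _ _)
    have hne : p ++ [c] ≠ r := by
      intro he
      have h1 := h.length_le
      have h2 := congrArg List.length he
      simp at h2; omega
    rw [cano, canoAdd, ih _ _ h']
    congr 1
    split
    · unfold canoStep
      simp [hne, (List.isPrefixOf_iff_prefix).2 h']
    · rfl

-- B's inner fold computes canoAdd
theorem bfold_eq_canoAdd (t p : List Char) (s : PySem.Set (List Char)) :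
    (t.foldl (fun (st : List Char × PySem.Set (List Char)) ch =>
        let acc := st.1 ++ [ch]
        if ch = '/' then (acc, PySem.Set.add st.2 acc) else (acc, st.2)) (p, s)).2
      = canoAdd t p s := by
  induction t generalizing p s with
  | nil => rfl
  | cons c t ih =>
    by_cases hc : c = '/' <;> simp [canoAdd, hc, ih]

-- A's fuelled find/slice loop computes cano on the unscanned suffix
theorem aInner_eq_cano (l r : List Char) (fuel : Nat) (k : Nat) (s : PySem.Set (List Char))
    (hk : k ≤ l.length) (hfuel : l.length + 1 - k ≤ fuel) :
    aInner l r fuel (k : Int) s = cano (l.drop k) (l.take k) r s := by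
  induction fuel generalizing k s with
  | zero => omega
  | succ fuel ih =>
    by_cases hfind : PySem.Chars.find (l.drop k) ['/'] = -1
    · -- no further slash: the loop exits, and cano inserts nothing
      have hff : PySem.Chars.findFrom l ['/'] (k : Int) = -1 := by
        rw [PySem.Chars.findFrom_natCast l ['/'] k hk, if_pos hfind]
      have hns : '/' ∉ l.drop k := fun hm =>
        (PySem.Chars.find_eq_neg_one_iff (l.drop k) ['/']).1 hfind (singleton_infix_iff.2 hm)
      simp only [aInner, hff]
      norm_num
      exact (cano_no_slash _ _ _ _ hns).symm
    · -- a slash at position k + m: one loop pass = one cano_seg step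
      have hnonneg : 0 ≤ PySem.Chars.find (l.drop k) ['/'] := by
        have := PySem.Chars.neg_one_le_find (l.drop k) ['/']; omega
      obtain ⟨m, hm⟩ : ∃ m : Nat, PySem.Chars.find (l.drop k) ['/'] = (m : Int) :=
        ⟨(PySem.Chars.find (l.drop k) ['/']).toNat, (Int.toNat_of_nonneg hnonneg).symm⟩
      obtain ⟨hpre, hmin⟩ := PySem.Chars.find_spec (s := l.drop k) (sub := ['/']) hnonneg
      rw [hm] at hpre hmin
      simp only [Int.toNat_natCast] at hpre hmin
      have hmlt : m < (l.drop k).length := by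
        rcases Nat.lt_or_ge m (l.drop k).length with hlt | hge
        · exact hlt
        · exfalso
          rw [List.drop_eq_nil_of_le hge] at hpre
          exact absurd hpre.length_le (by simp)
      have hgetm : (l.drop k)[m] = '/' := by
        rw [List.drop_eq_getElem_cons hmlt] at hpre
        obtain ⟨u, hu⟩ := hpre
        exact (List.cons.injEq .. ▸ hu : _ ∧ _).1.symm
      have hnoslash : '/' ∉ (l.drop k).take m := by
        intro hmem
        obtain ⟨i, hi, hgi⟩ := List.getElem_of_mem hmem
        have hilen : i < m := by
          have := hi; simp [List.length_take] at this; omega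
        have hgi' : (l.drop k)[i] = '/' := by rw [← List.getElem_take (h := hi), hgi]
        exact hmin i hilen (singleton_prefix_drop (by omega) hgi')
      have hff : PySem.Chars.findFrom l ['/'] (k : Int) = ((k + m : Nat) : Int) := by
        rw [PySem.Chars.findFrom_natCast l ['/'] k hk, if_neg hfind, hm]; push_cast; ring
      have hcast : ((k + m : Nat) : Int) + 1 = ((k + m + 1 : Nat) : Int) := by push_cast; ring
      have hsub : PySem.Chars.slice l (some 0) (some (((k + m : Nat) : Int) + 1))
          = l.take (k + m + 1) := by
        rw [hcast, PySem.Chars.slice_eq_listSlice, PySem.List.slice_zero_start,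
          PySem.List.slice_to_natCast]
      have hk' : k + m + 1 ≤ l.length := by
        have : m < l.length - k := by simpa using hmlt
        omega
      have hfuel' : l.length + 1 - (k + m + 1) ≤ fuel := by omega
      have hdecomp : l.drop k = (l.drop k).take m ++ '/' :: l.drop (k + m + 1) := by
        conv_lhs => rw [← List.take_append_drop m (l.drop k)]
        rw [List.drop_eq_getElem_cons hmlt, hgetm, List.drop_drop, Nat.add_assoc]
      have hptake : l.take k ++ ((l.drop k).take m ++ ['/']) = l.take (k + m + 1) := by
        rw [show k + m + 1 = k + (m + 1) by omega, List.take_add]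
        congr 1
        rw [List.take_add_one]
        congr 1
        simp [List.getElem?_eq_getElem hmlt, hgetm]
      have hrhs : cano (l.drop k) (l.take k) r s
          = cano (l.drop (k + m + 1)) (l.take (k + m + 1)) r
              (canoStep r s (l.take (k + m + 1))) := by
        conv_lhs => rw [hdecomp]
        rw [cano_seg _ _ _ _ _ hnoslash, List.append_assoc, hptake]
      have hne0 : ¬ (((k + m : Nat) : Int) + 1 = 0) := by push_cast; omega
      simp only [aInner, hff, hsub]
      rw [if_neg hne0, hcast, hrhs]
      -- now A's three branches are exactly canoStep
      unfold canoStep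
      by_cases he : l.take (k + m + 1) = r
      · rw [if_pos he, if_pos he]
        exact ih (k + m + 1) s hk' hfuel'
      · rw [if_neg he, if_neg he]
        by_cases hp : PySem.Chars.startswith (l.take (k + m + 1)) r = true
        · have hp' : r <+: l.take (k + m + 1) := by
            have : r.isPrefixOf (l.take (k + m + 1)) = true := hp
            exact (List.isPrefixOf_iff_prefix).1 this
          rw [if_pos hp, if_pos ((List.isPrefixOf_iff_prefix).2 hp')]
          exact ih (k + m + 1) _ hk' hfuel'
        · have hp' : ¬ r.isPrefixOf (l.take (k + m + 1)) = true := hp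
          rw [if_neg hp, if_neg hp']
          exact ih (k + m + 1) s hk' hfuel'

-- per line: A's loop = B's line step
theorem line_eq (l r : List Char) (s : PySem.Set (List Char)) :
    aInner l r (l.length + 1) 0 s = bLine r s l := by
  have hA : aInner l r (l.length + 1) 0 s = cano l [] r s := by
    simpa using aInner_eq_cano l r (l.length + 1) 0 s (Nat.zero_le _) (by omega)
  unfold bLine
  by_cases hpref : PySem.Chars.startswith l r = true
  · rw [if_pos hpref]
    have hrl : r <+: l := (List.isPrefixOf_iff_prefix).1 hpref
    have htake : l.take r.length = r := (List.prefix_iff_eq_take.1 hrl).symm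
    rw [bfold_eq_canoAdd]
    have hsplit : cano l [] r s
        = cano (l.drop r.length) (l.take r.length) r (cano (l.take r.length) [] r s) := by
      conv_lhs => rw [← List.take_append_drop r.length l]
      rw [cano_append]
      rfl
    have hinside : cano (l.take r.length) [] r s = s := by
      apply cano_inside
      simp [htake]
    have hslice : PySem.Chars.slice l (some ((r.length : Nat) : Int)) none = l.drop r.length := by
      rw [PySem.Chars.slice_eq_listSlice, PySem.List.slice_from_natCast]
    rw [hslice, hA, hsplit, hinside, htake, cano_eq_canoAdd _ _ _ _ (List.prefix_refl r)]
  · rw [if_neg hpref, hA]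
    apply cano_not_pref
    intro hc
    exact hpref ((List.isPrefixOf_iff_prefix).2 (by simpa using hc))

theorem foldl_lines_eq (lines : List String) (r : String) (s : PySem.Set (List Char)) :
    lines.foldl (fun s line => aInner line.toList r.toList (line.toList.length + 1) 0 s) s
      = lines.foldl (fun s line => bLine r.toList s line.toList) s := by
  simp only [line_eq]

-- ===== VERDICT (by name: the statement is the Claim_ definition above) =====
theorem get_intermediate_dirs_py_spec : Claim_equal_get_intermediate_dirs_py := by
  intro lines root_dir _
  unfold Spec_get_intermediate_dirs_py get_intermediate_dirs_py get_intermediate_dirs_py_alt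
  rw [foldl_lines_eq]
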